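-- pv_equiv track=rewrite | github.com/hube12/genlayer | genLayer.py | sameClass
-- ===== SOURCE A (Python) =====
-- def sameClass(biomeA, biomeB):
--     flag = False
--     biomeClass = {"ocean": [0, 10, 24],
--                   "plains": [1, 129],
--                   "desert": [2, 17, 27, 28, 29, 130],
--                   "hills": [3, 20, 34, 131, 162],
--                   "forest": [4, 18, 132, 157],
--                   "taiga": [5, 19, 30, 31, 32, 33, 133, 158, 160, 161],
--                   "swamp": [6, 134],
--                   "river": [7, 11],
--                   "hell": [8],
--                   "end": [9],
--                   "mushroom": [14, 15],
--                   "mesa": [37, 38, 39],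
--                   "savanna": [35, 36],
--                   "beach": [16, 26],
--                   "stonebeach": [25],
--                   "jungle": [21, 22, 23, 149, 151],
--                   "savannaMutated": [163, 164],
--                   "forestMutated": [155, 156],
--                   "snow": [12, 13, 140],
--                   "void": [127]}
--     for el in biomeClass:
--         if biomeB in biomeClass[el] and biomeA in biomeClass[el]:
--             flag = True
--     return flag
-- ===== SOURCE B (Python) =====
-- # Precomputed inverse table (biome id -> class index), written out as a literal:
-- # two O(1) lookups with a None guard replace A's scan over every class.
-- _CLASS_OF = {0: 0, 10: 0, 24: 0, 1: 1, 129: 1, 2: 2, 17: 2, 27: 2, 28: 2, 29: 2,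
--              130: 2, 3: 3, 20: 3, 34: 3, 131: 3, 162: 3, 4: 4, 18: 4, 132: 4,
--              157: 4, 5: 5, 19: 5, 30: 5, 31: 5, 32: 5, 33: 5, 133: 5, 158: 5,
--              160: 5, 161: 5, 6: 6, 134: 6, 7: 7, 11: 7, 8: 8, 9: 9, 14: 10,
--              15: 10, 37: 11, 38: 11, 39: 11, 35: 12, 36: 12, 16: 13, 26: 13,
--              25: 14, 21: 15, 22: 15, 23: 15, 149: 15, 151: 15, 163: 16, 164: 16,
--              155: 17, 156: 17, 12: 18, 13: 18, 140: 18, 127: 19}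
--
--
-- def sameClass(biomeA, biomeB):
--     ca = _CLASS_OF.get(biomeA)
--     return ca is not None and ca == _CLASS_OF.get(biomeB)
-- ===== Notes on version B (the rewrite author's own statement) =====
-- stated objective: idiomatic
-- what changed: Replaces A's per-call scan over all 20 classes (two list-membership tests per class) by a precomputed literal inverse table biome id -> class index, so each call is two dict lookups with a None guard.
import Mathlib
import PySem

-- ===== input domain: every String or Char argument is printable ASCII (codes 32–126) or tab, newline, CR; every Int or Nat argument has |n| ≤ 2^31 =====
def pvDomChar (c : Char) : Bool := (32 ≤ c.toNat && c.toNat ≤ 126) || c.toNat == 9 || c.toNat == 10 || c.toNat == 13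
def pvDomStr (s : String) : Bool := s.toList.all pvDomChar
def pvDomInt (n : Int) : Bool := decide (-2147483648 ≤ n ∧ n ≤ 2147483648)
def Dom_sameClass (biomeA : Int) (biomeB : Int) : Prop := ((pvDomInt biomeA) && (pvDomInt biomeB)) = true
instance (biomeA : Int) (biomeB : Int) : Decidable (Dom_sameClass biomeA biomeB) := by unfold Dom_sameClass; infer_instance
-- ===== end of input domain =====

-- B replaces A's per-call scan over every class by a precomputed literal inverse table (biome id -> class index) and two guarded lookups (idiomatic; same observable behaviour).

-- ===== PORT A =====
-- the biomeClass dict literal of A (insertion order)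
def pvPairs : List (String × List Int) :=
  [("ocean", [0, 10, 24]),
   ("plains", [1, 129]),
   ("desert", [2, 17, 27, 28, 29, 130]),
   ("hills", [3, 20, 34, 131, 162]),
   ("forest", [4, 18, 132, 157]),
   ("taiga", [5, 19, 30, 31, 32, 33, 133, 158, 160, 161]),
   ("swamp", [6, 134]),
   ("river", [7, 11]),
   ("hell", [8]),
   ("end", [9]),
   ("mushroom", [14, 15]),
   ("mesa", [37, 38, 39]),
   ("savanna", [35, 36]),
   ("beach", [16, 26]),
   ("stonebeach", [25]),
   ("jungle", [21, 22, 23, 149, 151]),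
   ("savannaMutated", [163, 164]),
   ("forestMutated", [155, 156]),
   ("snow", [12, 13, 140]),
   ("void", [127])]

-- 'for el in biomeClass: if biomeB in biomeClass[el] and biomeA in biomeClass[el]: flag = True'
def sameClass (biomeA : Int) (biomeB : Int) : Bool :=
  pvPairs.foldl (fun flag el => if el.2.contains biomeB && el.2.contains biomeA then true else flag) false

-- ===== PORT B =====
-- _CLASS_OF = {0: 0, 10: 0, 24: 0, 1: 1, ...}: the literal inverse table of Source B
def pvTable : PySem.Dict Int Int := PySem.Dict.ofList
  [(0, 0), (10, 0), (24, 0), (1, 1), (129, 1), (2, 2), (17, 2), (27, 2), (28, 2), (29, 2),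
   (130, 2), (3, 3), (20, 3), (34, 3), (131, 3), (162, 3), (4, 4), (18, 4), (132, 4),
   (157, 4), (5, 5), (19, 5), (30, 5), (31, 5), (32, 5), (33, 5), (133, 5), (158, 5),
   (160, 5), (161, 5), (6, 6), (134, 6), (7, 7), (11, 7), (8, 8), (9, 9), (14, 10),
   (15, 10), (37, 11), (38, 11), (39, 11), (35, 12), (36, 12), (16, 13), (26, 13),
   (25, 14), (21, 15), (22, 15), (23, 15), (149, 15), (151, 15), (163, 16), (164, 16),
   (155, 17), (156, 17), (12, 18), (13, 18), (140, 18), (127, 19)]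

-- ca = _CLASS_OF.get(biomeA); return ca is not None and ca == _CLASS_OF.get(biomeB)
def sameClass_alt (biomeA : Int) (biomeB : Int) : Bool :=
  match pvTable.get? biomeA with
  | none => false
  | some ca => pvTable.get? biomeB == some ca

-- ===== PRECONDITION & SPEC =====
def Spec_sameClass (biomeA : Int) (biomeB : Int) (out : Bool) : Prop := out = sameClass_alt biomeA biomeB
instance (biomeA : Int) (biomeB : Int) (out : Bool) : Decidable (Spec_sameClass biomeA biomeB out) := by unfold Spec_sameClass; infer_instance

-- ===== CLAIM =====
def Claim_equal_sameClass : Prop := ∀ (biomeA : Int) (biomeB : Int), Dom_sameClass biomeA biomeB → Spec_sameClass biomeA biomeB (sameClass biomeA biomeB)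

-- ===== LEMMAS AND PROOFS =====

set_option maxRecDepth 100000 in
theorem pvTable_keys_nodup : pvTable.keys.Nodup := by decide

-- the table's items list, and its correspondence to A's biomeClass enumerated with class indices
set_option maxRecDepth 100000 in
theorem pvTable_items :
    pvTable.items =
      (PySem.List.enumerate pvPairs 0).flatMap (fun q => q.2.2.map (fun i => (i, q.1))) := by
  decide

theorem pvTable_get? (x k : Int) :
    pvTable.get? x = some k ↔
      ∃ q ∈ PySem.List.enumerate pvPairs 0, x ∈ q.2.2 ∧ k = q.1 := by
  rw [PySem.Dict.get?_eq_some_iff_mem_items pvTable x k pvTable_keys_nodup, pvTable_items]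
  simp only [List.mem_flatMap, List.mem_map]
  constructor
  · rintro ⟨q, hq, i, hi, h⟩
    cases h
    exact ⟨q, hq, hi, rfl⟩
  · rintro ⟨q, hq, hx, rfl⟩
    exact ⟨q, hq, x, hx, rfl⟩

theorem sameClass_eq_any (a b : Int) :
    sameClass a b = pvPairs.any (fun el => el.2.contains b && el.2.contains a) := by
  simpa [sameClass] using
    PySem.List.foldl_if_true_eq (l := pvPairs)
      (p := fun el => el.2.contains b && el.2.contains a) (b := false)

-- ===== VERDICT =====
set_option maxRecDepth 100000 in
theorem sameClass_spec : Claim_equal_sameClass := by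
  intro a b _
  unfold Spec_sameClass
  rw [sameClass_eq_any, Bool.eq_iff_iff]
  simp only [List.any_eq_true, Bool.and_eq_true, List.contains_eq_mem, decide_eq_true_eq]
  constructor
  · rintro ⟨p, hp, hb, ha⟩
    rcases List.mem_iff_getElem.1 hp with ⟨j, hj, rfl⟩
    have hmem : ((j : Int), pvPairs[j]) ∈ PySem.List.enumerate pvPairs 0 :=
      (PySem.List.mem_enumerate_iff pvPairs 0 _).2 ⟨j, hj, by simp⟩
    have hA : pvTable.get? a = some (j : Int) :=
      (pvTable_get? a j).2 ⟨((j : Int), pvPairs[j]), hmem, ha, rfl⟩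
    have hB : pvTable.get? b = some (j : Int) :=
      (pvTable_get? b j).2 ⟨((j : Int), pvPairs[j]), hmem, hb, rfl⟩
    unfold sameClass_alt
    rw [hA, hB]
    simp
  · intro h
    unfold sameClass_alt at h
    rcases hA : pvTable.get? a with _ | ca
    · rw [hA] at h; simp at h
    · rw [hA] at h
      simp only [beq_iff_eq] at h
      rcases (pvTable_get? a ca).1 hA with ⟨q, hq, haq, hk⟩
      rcases (pvTable_get? b ca).1 h with ⟨q', hq', hbq, hk'⟩
      rcases (PySem.List.mem_enumerate_iff pvPairs 0 _).1 hq with ⟨j, hj, rfl⟩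
      rcases (PySem.List.mem_enumerate_iff pvPairs 0 _).1 hq' with ⟨j', hj', rfl⟩
      have hjj : j = j' := by omega
      subst hjj
      exact ⟨pvPairs[j], List.getElem_mem hj, hbq, haq⟩
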